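-- pv_equiv track=rewrite | github.com/ryboselm/Clock-Game | players/team_8.py | __utility
-- ===== SOURCE A (Python) =====
-- def __utility(constraints: list[str], final_state: list[str]):
--     """Utility function that returns player's score after a single monte carlo simulation
--
--     Args:
--         final_state (list(str)): The simulated letters at every hour of the 24 hour clock
--         constraints(list(str)): The constraints assigned to the given player
--
--     Returns:
--         int: player's core after a single monte carlo simulation
--     """
--     score_value_list = [
--         1, 3, 6, 12]  # points for satisfying constraints on different lengths
--     score = 0
--     for i in range(len(constraints)):
--         list_of_letters = constraints[i].split("<")
--         constraint_true_indic = True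
--         for j in range(len(list_of_letters)-1):
--             distance_difference = (final_state.index(
--                 list_of_letters[j+1]) % 12) - (final_state.index(list_of_letters[j]) % 12)
--             if distance_difference < 0:
--                 distance_difference = distance_difference + 12
--             if not (distance_difference <= 5 and distance_difference > 0):
--                 constraint_true_indic = False
--             if constraint_true_indic == False:
--                 score = score - 1
--             else:
--                 score = score + score_value_list[len(list_of_letters) - 2]
--     return score
-- ===== SOURCE B (Python) =====
-- def __utility(constraints: list[str], final_state: list[str]):
--     # Build a position index once: letter -> (first clock position % 12).
--     pos = {}
--     for i, letter in enumerate(final_state):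
--         pos.setdefault(letter, i % 12)
--
--     def chain(letters, parts):
--         # contribution of the remaining letters of one constraint
--         if len(letters) < 2:
--             return 0
--         d = (pos[letters[1]] - pos[letters[0]]) % 12
--         if 0 < d <= 5:
--             return [1, 3, 6, 12][len(parts) - 2] + chain(letters[1:], parts)
--         return 1 - len(letters)
--
--     total = 0
--     for c in constraints:
--         parts = c.split("<")
--         total += chain(parts, parts)
--     return total
-- ===== Notes on version B (the rewrite author's own statement) =====
-- stated objective: alternative
-- what changed: B builds a letter->clock-position hash index over final_state once (setdefault keeps the first occurrence, matching list.index) instead of calling final_state.index per pair, and scores each constraint by a recursive descent over its letter chain that adds the weight per satisfied pair and returns the negative count of remaining pairs at the first violation, replacing A's indexed loop threading a sticky boolean flag.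
import Mathlib
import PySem

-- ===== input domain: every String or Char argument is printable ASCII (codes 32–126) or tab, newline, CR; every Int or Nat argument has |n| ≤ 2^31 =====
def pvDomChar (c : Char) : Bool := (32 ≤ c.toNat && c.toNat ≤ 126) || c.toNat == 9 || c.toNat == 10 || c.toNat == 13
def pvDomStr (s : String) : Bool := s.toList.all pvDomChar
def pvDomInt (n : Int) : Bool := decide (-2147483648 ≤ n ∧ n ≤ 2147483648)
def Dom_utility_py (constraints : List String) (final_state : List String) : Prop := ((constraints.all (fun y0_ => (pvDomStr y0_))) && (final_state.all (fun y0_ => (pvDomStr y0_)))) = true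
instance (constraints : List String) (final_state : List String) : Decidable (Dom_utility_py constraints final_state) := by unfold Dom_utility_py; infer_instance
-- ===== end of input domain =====

-- B builds a letter -> clock-position hash index over final_state once (setdefault keeps the first
-- occurrence, matching list.index) and scores each constraint by a recursive descent over its letter chain.

-- s.split("<") (split? is none only for an empty separator)
def pvSplit (s : String) : List String := (PySem.Str.split? s "<").getD []

-- ===== PORT A =====
-- the body of A's inner `for j in range(len(list_of_letters)-1)` loop, state = (score, constraint_true_indic)
def pvStepA (final_state : List String) (list_of_letters : List String)
    (score_value_list : List Int) (st : Int × Bool) (j : Int) : Int × Bool :=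
  let dd : Int :=
    PySem.Int.mod ((PySem.List.index? final_state (PySem.List.pyGetD list_of_letters (j + 1) "")).getD 0 : Int) 12
      - PySem.Int.mod ((PySem.List.index? final_state (PySem.List.pyGetD list_of_letters j "")).getD 0 : Int) 12
  let dd : Int := if dd < 0 then dd + 12 else dd
  let indic : Bool := if ¬ (dd ≤ 5 ∧ dd > 0) then false else st.2
  let score : Int :=
    if indic = false then st.1 - 1
    else st.1 + PySem.List.pyGetD score_value_list ((list_of_letters.length : Int) - 2) 0
  (score, indic)

def utility_py (constraints : List String) (final_state : List String) : Int :=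
  let score_value_list : List Int := [1, 3, 6, 12]
  (PySem.List.pyRange 0 (constraints.length : Int) 1).foldl
    (fun score i =>
      let list_of_letters := pvSplit (PySem.List.pyGetD constraints i "")
      ((PySem.List.pyRange 0 ((list_of_letters.length : Int) - 1) 1).foldl
        (pvStepA final_state list_of_letters score_value_list) (score, true)).1)
    0

-- ===== PORT B =====
-- `for i, letter in enumerate(final_state): pos.setdefault(letter, i % 12)`
def pvPos (final_state : List String) : PySem.Dict String Int :=
  (PySem.List.enumerate final_state).foldl
    (fun d p => d.setdefault p.2 (PySem.Int.mod p.1 12)) PySem.Dict.empty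

-- B's recursive `chain(letters, parts)`
def pvChain (pos : PySem.Dict String Int) (parts : List String) : List String → Int
  | [] => 0
  | [_] => 0
  | a :: b :: rest =>
      let d : Int := PySem.Int.mod ((pos.get? b).getD 0 - (pos.get? a).getD 0) 12
      if 0 < d ∧ d ≤ 5 then
        PySem.List.pyGetD ([1, 3, 6, 12] : List Int) ((parts.length : Int) - 2) 0
          + pvChain pos parts (b :: rest)
      else 1 - ((a :: b :: rest).length : Int)

def utility_py_alt (constraints : List String) (final_state : List String) : Int :=
  let pos := pvPos final_state
  constraints.foldl
    (fun total c =>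
      let parts := pvSplit c
      total + pvChain pos parts parts)
    0

-- ===== PRECONDITION & SPEC =====
-- Pre_ = exactly the inputs on which Python A returns: every letter of a multi-letter constraint occurs in
-- final_state (else list.index raises ValueError), and a constraint with >= 6 letters has a violated first
-- adjacent pair (else A reads score_value_list[len-2] and raises IndexError).
def Pre_utility_py (constraints : List String) (final_state : List String) : Prop :=
  ∀ c ∈ constraints,
    (pvSplit c).length ≤ 1 ∨
      ((∀ p ∈ pvSplit c, p ∈ final_state) ∧
        ((pvSplit c).length ≤ 5 ∨
          ¬ (0 < PySem.Int.mod
                (PySem.Int.mod ((PySem.List.index? final_state ((pvSplit c).getD 1 "")).getD 0 : Int) 12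
                  - PySem.Int.mod ((PySem.List.index? final_state ((pvSplit c).getD 0 "")).getD 0 : Int) 12) 12
            ∧ PySem.Int.mod
                (PySem.Int.mod ((PySem.List.index? final_state ((pvSplit c).getD 1 "")).getD 0 : Int) 12
                  - PySem.Int.mod ((PySem.List.index? final_state ((pvSplit c).getD 0 "")).getD 0 : Int) 12) 12 ≤ 5)))

instance (constraints : List String) (final_state : List String) :
    Decidable (Pre_utility_py constraints final_state) := by
  unfold Pre_utility_py; infer_instance

def pvWitness_utility_py : List String × List String := (["a<b", "c<a<b", "x"], ["a", "b", "c"])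

def Spec_utility_py (constraints : List String) (final_state : List String) (out : Int) : Prop := out = utility_py_alt constraints final_state
instance (constraints : List String) (final_state : List String) (out : Int) : Decidable (Spec_utility_py constraints final_state out) := by unfold Spec_utility_py; infer_instance

-- ===== CLAIM (what is proved, stated in full; the proofs are below) =====
def Claim_equal_utility_py : Prop := ∀ (constraints : List String) (final_state : List String), Dom_utility_py constraints final_state → Pre_utility_py constraints final_state → Spec_utility_py constraints final_state (utility_py constraints final_state)

-- ===== LEMMAS AND PROOFS =====

-- B's position index, characterised: get? is the first-occurrence index of the letter, taken % 12
theorem pvPos_fold_get? (fs : List String) :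
    ∀ (s : Int) (d : PySem.Dict String Int) (l : String),
      ((PySem.List.enumerate fs s).foldl
          (fun d p => d.setdefault p.2 (PySem.Int.mod p.1 12)) d).get? l
        = (d.get? l).or ((PySem.List.index? fs l).map (fun (i : Nat) => PySem.Int.mod (s + (i : Int)) 12)) := by
  induction fs with
  | nil =>
      intro s d l
      simp [PySem.List.enumerate_nil, PySem.List.index?_eq_idxOf?]
  | cons x fs ih =>
      intro s d l
      rw [PySem.List.enumerate_cons, List.foldl_cons, ih (s + 1) _ l]
      by_cases hx : x = l
      · subst hx
        rw [PySem.Dict.get?_setdefault_self, PySem.List.index?_cons_self]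
        cases hd : d.get? x <;> simp [Option.or]
      · rw [PySem.Dict.get?_setdefault_of_ne _ _ (Ne.symm hx),
          PySem.List.index?_cons_of_ne _ hx]
        cases hi : PySem.List.index? fs l with
        | none => simp
        | some i =>
            simp only [Option.map_some]
            rw [show s + 1 + (i : Int) = s + ((i : Int) + 1) from by ring]
            norm_cast

theorem pvPosD (fs : List String) (l : String) :
    ((pvPos fs).get? l).getD 0
      = PySem.Int.mod ((PySem.List.index? fs l).getD 0 : Int) 12 := by
  unfold pvPos
  rw [pvPos_fold_get? fs 0 PySem.Dict.empty l]
  cases hi : PySem.List.index? fs l with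
  | none => simp [Option.or]
  | some i => simp [Option.or]

-- once the sticky flag is false, every remaining iteration just subtracts 1
theorem pvStepA_false_loop (fs parts : List String) (svl : List Int) :
    ∀ (k : Nat) (i : Int) (s : Int), i + k = (parts.length : Int) - 1 →
      (PySem.List.pyRange i ((parts.length : Int) - 1) 1).foldl (pvStepA fs parts svl) (s, false)
        = (s - k, false) := by
  intro k
  induction k with
  | zero =>
      intro i s h
      rw [PySem.List.pyRange_one_eq_nil (by omega)]
      simp
  | succ k ih =>
      intro i s h
      rw [PySem.List.pyRange_one_cons (by omega)]
      have hstep : pvStepA fs parts svl (s, false) i = (s - 1, false) := by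
        simp only [pvStepA]
        split_ifs <;> simp_all
      rw [List.foldl_cons, hstep, ih (i + 1) (s - 1) (by omega)]
      have : s - 1 - (k : Int) = s - ((k + 1 : Nat) : Int) := by push_cast; ring
      rw [this]

-- A's conditionally shifted difference of clock positions is the %12 difference B computes
theorem pvDD_eq_mod (a b : Int) (ha0 : 0 ≤ a) (ha1 : a < 12) (hb0 : 0 ≤ b) (hb1 : b < 12) :
    (if a - b < 0 then a - b + 12 else a - b) = PySem.Int.mod (a - b) 12 := by
  rw [PySem.Int.mod_eq_emod_of_pos (show (0 : Int) < 12 by norm_num)]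
  omega

-- A's inner loop, started at pair index i with the flag still true, equals B's recursive chain score
theorem pvChain_loop (fs parts : List String) :
    ∀ (k i : Nat) (s : Int), i + k + 1 = parts.length →
      ((PySem.List.pyRange (i : Int) ((parts.length : Int) - 1) 1).foldl
          (pvStepA fs parts [1, 3, 6, 12]) (s, true)).1
        = s + pvChain (pvPos fs) parts (parts.drop i) := by
  intro k
  induction k with
  | zero =>
      intro i s h
      rw [PySem.List.pyRange_one_eq_nil (by omega)]
      have hd0 : parts.drop i = parts[i] :: parts.drop (i + 1) :=
        List.drop_eq_getElem_cons (by omega)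
      have hnil : parts.drop (i + 1) = [] := List.drop_eq_nil_of_le (by omega)
      rw [hd0, hnil]
      simp [pvChain]
  | succ k ih =>
      intro i s h
      have hi : i < parts.length := by omega
      have hi1 : i + 1 < parts.length := by omega
      have hd0 : parts.drop i = parts[i] :: parts.drop (i + 1) := List.drop_eq_getElem_cons hi
      have hd1 : parts.drop (i + 1) = parts[i + 1] :: parts.drop (i + 2) := List.drop_eq_getElem_cons hi1
      have hg0 : PySem.List.pyGetD parts ((i : Int)) "" = parts[i] := by
        rw [PySem.List.pyGetD_natCast]
        exact List.getD_eq_getElem _ _ hi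
      have hg1 : PySem.List.pyGetD parts ((i : Int) + 1) "" = parts[i + 1] := by
        rw [show ((i : Int) + 1) = ((i + 1 : Nat) : Int) from by omega,
          PySem.List.pyGetD_natCast]
        exact List.getD_eq_getElem _ _ hi1
      have hdB : PySem.Int.mod
          (((pvPos fs).get? parts[i + 1]).getD 0 - ((pvPos fs).get? parts[i]).getD 0) 12
          = PySem.Int.mod
              (PySem.Int.mod ((PySem.List.index? fs parts[i + 1]).getD 0 : Int) 12
                - PySem.Int.mod ((PySem.List.index? fs parts[i]).getD 0 : Int) 12) 12 := by
        rw [pvPosD, pvPosD]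
      have hdd := pvDD_eq_mod
        (PySem.Int.mod ((PySem.List.index? fs parts[i + 1]).getD 0 : Int) 12)
        (PySem.Int.mod ((PySem.List.index? fs parts[i]).getD 0 : Int) 12)
        (PySem.Int.mod_nonneg _ (by norm_num)) (PySem.Int.mod_lt _ (by norm_num))
        (PySem.Int.mod_nonneg _ (by norm_num)) (PySem.Int.mod_lt _ (by norm_num))
      rw [PySem.List.pyRange_one_cons (by omega), List.foldl_cons, hd0, hd1]
      simp only [pvChain, hdB]
      by_cases hsat : 0 < PySem.Int.mod
            (PySem.Int.mod ((PySem.List.index? fs parts[i + 1]).getD 0 : Int) 12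
              - PySem.Int.mod ((PySem.List.index? fs parts[i]).getD 0 : Int) 12) 12
          ∧ PySem.Int.mod
            (PySem.Int.mod ((PySem.List.index? fs parts[i + 1]).getD 0 : Int) 12
              - PySem.Int.mod ((PySem.List.index? fs parts[i]).getD 0 : Int) 12) 12 ≤ 5
      · have hstep : pvStepA fs parts [1, 3, 6, 12] (s, true) (i : Int)
            = (s + PySem.List.pyGetD ([1, 3, 6, 12] : List Int) ((parts.length : Int) - 2) 0, true) := by
          simp only [pvStepA, hg0, hg1]
          rw [hdd, if_neg (not_not_intro ⟨hsat.2, hsat.1⟩)]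
          norm_num
        rw [hstep, show ((i : Int) + 1) = ((i + 1 : Nat) : Int) from by omega,
          ih (i + 1) _ (by omega), hd1, if_pos hsat]
        ring
      · have hstep : pvStepA fs parts [1, 3, 6, 12] (s, true) (i : Int) = (s - 1, false) := by
          simp only [pvStepA, hg0, hg1]
          rw [hdd, if_pos (fun hc => hsat ⟨hc.2, hc.1⟩)]
          norm_num
        rw [hstep,
          pvStepA_false_loop fs parts [1, 3, 6, 12] k ((i : Int) + 1) (s - 1) (by omega),
          if_neg hsat]
        have hlen : (parts.drop (i + 2)).length = k := by
          rw [List.length_drop]; omega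
        simp only [List.length_cons, hlen]
        push_cast
        ring

-- per-constraint: A's inner loop equals B's chain score, for every start score
theorem pvConstraint_eq (fs : List String) (parts : List String) (s : Int) :
    ((PySem.List.pyRange 0 ((parts.length : Int) - 1) 1).foldl
        (pvStepA fs parts [1, 3, 6, 12]) (s, true)).1
      = s + pvChain (pvPos fs) parts parts := by
  cases parts with
  | nil =>
      rw [PySem.List.pyRange_one_eq_nil (by norm_num)]
      simp [pvChain]
  | cons p rest =>
      have h := pvChain_loop fs (p :: rest) rest.length 0 s (by simp)
      rw [show ((0 : Nat) : Int) = (0 : Int) from rfl] at h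
      simpa using h

-- ===== VERDICT (by name: the statement is the Claim_ definition above) =====
theorem utility_py_spec : Claim_equal_utility_py := by
  intro constraints final_state _ _
  unfold Spec_utility_py utility_py utility_py_alt
  show (PySem.List.pyRange 0 (constraints.length : Int) 1).foldl
      (fun score i =>
        ((PySem.List.pyRange 0 (((pvSplit (PySem.List.pyGetD constraints i "")).length : Int) - 1) 1).foldl
          (pvStepA final_state (pvSplit (PySem.List.pyGetD constraints i "")) [1, 3, 6, 12]) (score, true)).1)
      0
    = constraints.foldl
      (fun total c => total + pvChain (pvPos final_state) (pvSplit c) (pvSplit c)) 0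
  rw [PySem.List.foldl_pyRange_zero_pyGetD' constraints ""
    (fun score c =>
      ((PySem.List.pyRange 0 (((pvSplit c).length : Int) - 1) 1).foldl
        (pvStepA final_state (pvSplit c) [1, 3, 6, 12]) (score, true)).1) 0]
  apply PySem.List.foldl_congr_mem
  intro acc c _
  exact pvConstraint_eq final_state (pvSplit c) acc
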